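-- pv_equiv track=rewrite | github.com/seoyoung7623/AlgorithmPractice | 그리디알고리즘/PGM_체육복.py | solution
-- ===== SOURCE A (Python) =====
-- def solution(n, lost, reserve):
--     lost.sort()
--     reserve.sort()
--
--     # 마지막 코드에서 lost의 학생을 지우게 되므로 여벌옷을 가졌지만 잃어버린 학생을 먼저 중복 처리해주고 계산해야한다.
--     for i in reserve[:]: # reserve 복사
--         if i in lost:
--             reserve.remove(i)
--             lost.remove(i)
--
--     for i in reserve:
--         if i-1 in lost:
--             lost.remove(i-1)
--         elif i+1 in lost:
--             lost.remove(i+1)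
--     answer = n - len(lost)
--     return answer
-- ===== SOURCE B (Python) =====
-- def solution(n, lost, reserve):
--     # One counting dict of net lost-minus-reserve per student id; single sorted
--     # sweep over distinct ids instead of list sorting/removal passes.
--     net = {}
--     for x in lost:
--         net[x] = net.get(x, 0) + 1
--     for x in reserve:
--         net[x] = net.get(x, 0) - 1
--     for r in sorted(net):
--         m = -net[r]
--         if m > 0:
--             give = min(m, max(net.get(r - 1, 0), 0))
--             if give > 0:
--                 net[r - 1] -= give
--             give2 = min(m - give, max(net.get(r + 1, 0), 0))
--             if give2 > 0:
--                 net[r + 1] -= give2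
--     return n - sum(v for v in net.values() if v > 0)
-- ===== Notes on version B (the rewrite author's own statement) =====
-- stated objective: faster
-- what changed: Replaced A's list sorting plus repeated 'in'/remove list scans (quadratic) by one counting dict of net lost-minus-reserve per student id and a single sweep over the sorted distinct ids that lends in batches; return-value equivalence only (A also mutates its lost/reserve arguments, B does not).
import Mathlib
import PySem

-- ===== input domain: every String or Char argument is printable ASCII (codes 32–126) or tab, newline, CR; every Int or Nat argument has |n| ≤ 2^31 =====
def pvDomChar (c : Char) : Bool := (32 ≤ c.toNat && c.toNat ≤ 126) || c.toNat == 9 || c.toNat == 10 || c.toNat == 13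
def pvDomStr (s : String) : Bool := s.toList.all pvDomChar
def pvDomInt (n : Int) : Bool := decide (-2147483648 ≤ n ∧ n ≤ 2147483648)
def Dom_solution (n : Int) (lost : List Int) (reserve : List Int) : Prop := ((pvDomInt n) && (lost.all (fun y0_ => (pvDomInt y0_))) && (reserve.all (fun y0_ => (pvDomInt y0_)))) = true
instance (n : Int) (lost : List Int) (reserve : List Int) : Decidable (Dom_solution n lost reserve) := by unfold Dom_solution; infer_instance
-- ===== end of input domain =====

-- B replaces A's sorted-list membership/removal passes by one counting dict and a single
-- sorted sweep over distinct ids (faster); equivalence is about the RETURN value only: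
-- A sorts and removes from its lost/reserve arguments in place, B does not mutate them.

-- ===== PORT A =====
-- loop body of A's first pass: for i in reserve[:]: if i in lost: reserve.remove(i); lost.remove(i)
def stepMatch (st : List Int × List Int) (i : Int) : List Int × List Int :=
  if i ∈ st.2 then
    ((PySem.List.remove? st.1 i).getD st.1, (PySem.List.remove? st.2 i).getD st.2)
  else st

-- loop body of A's second pass: if i-1 in lost: lost.remove(i-1) elif i+1 in lost: lost.remove(i+1)
def stepLend (l : List Int) (i : Int) : List Int :=
  if i - 1 ∈ l then (PySem.List.remove? l (i - 1)).getD l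
  else if i + 1 ∈ l then (PySem.List.remove? l (i + 1)).getD l
  else l

def solution (n : Int) (lost : List Int) (reserve : List Int) : Int :=
  let lost1 := PySem.List.sorted lost (fun x => x) false
  let reserve1 := PySem.List.sorted reserve (fun x => x) false
  let st := reserve1.foldl stepMatch (reserve1, lost1)
  let lost3 := st.1.foldl stepLend st.2
  n - (lost3.length : Int)

-- ===== PORT B =====
-- net[x] = net.get(x, 0) + 1
def bumpAdd (d : PySem.Dict Int Int) (x : Int) : PySem.Dict Int Int := d.insert x (d.getD x 0 + 1)
-- net[x] = net.get(x, 0) - 1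
def bumpSub (d : PySem.Dict Int Int) (x : Int) : PySem.Dict Int Int := d.insert x (d.getD x 0 - 1)
-- loop body of B's sweep over sorted(net)
def sweepKey (d : PySem.Dict Int Int) (r : Int) : PySem.Dict Int Int :=
  let m := -(d.getD r 0)
  if 0 < m then
    let give := min m (max (d.getD (r - 1) 0) 0)
    let d1 := if 0 < give then d.insert (r - 1) (d.getD (r - 1) 0 - give) else d
    let give2 := min (m - give) (max (d1.getD (r + 1) 0) 0)
    if 0 < give2 then d1.insert (r + 1) (d1.getD (r + 1) 0 - give2) else d1
  else d

def solution_alt (n : Int) (lost : List Int) (reserve : List Int) : Int :=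
  let net0 := lost.foldl bumpAdd PySem.Dict.empty
  let net1 := reserve.foldl bumpSub net0
  let net2 := (PySem.List.sorted net1.keys (fun x => x) false).foldl sweepKey net1
  n - ((net2.values.filter (fun v => decide (0 < v))).sum)

-- ===== PRECONDITION & SPEC =====
def Spec_solution (n : Int) (lost : List Int) (reserve : List Int) (out : Int) : Prop := out = solution_alt n lost reserve
instance (n : Int) (lost : List Int) (reserve : List Int) (out : Int) : Decidable (Spec_solution n lost reserve out) := by unfold Spec_solution; infer_instance

-- ===== CLAIM (what is proved, stated in full; the proofs are below) =====
def Claim_equal_solution : Prop := ∀ (n : Int) (lost : List Int) (reserve : List Int), Dom_solution n lost reserve → Spec_solution n lost reserve (solution n lost reserve)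

-- ===== LEMMAS AND PROOFS =====

-- surplus of reserve over lost at id k (A's remaining reserve multiset has this many k's)
def mA (lost reserve : List Int) (k : Int) : Nat :=
  reserve.count k - min (lost.count k) (reserve.count k)

-- simulation invariant between A's current lost list and B's current dict during the sweep
def InvD (N : PySem.Dict Int Int) (l : List Int) (d : PySem.Dict Int Int) : Prop :=
  ∀ k, if N.getD k 0 < 0 then d.getD k 0 = N.getD k 0 ∧ l.count k = 0
       else d.getD k 0 = (l.count k : Int)

-- ---- counting-dict lemmas ----
theorem getD_bumpAdd_fold (xs : List Int) (d : PySem.Dict Int Int) (k : Int) :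
    (xs.foldl bumpAdd d).getD k 0 = d.getD k 0 + (xs.count k : Int) := by
  induction xs generalizing d with
  | nil => simp
  | cons x xs ih =>
    simp only [List.foldl_cons, ih, bumpAdd, PySem.Dict.getD_insert, List.count_cons]
    by_cases hx : k = x
    · subst hx; simp; push_cast; ring
    · simp only [if_neg hx, beq_iff_eq, if_neg (fun h => hx (Eq.symm h))]
      push_cast; ring

theorem getD_bumpSub_fold (xs : List Int) (d : PySem.Dict Int Int) (k : Int) :
    (xs.foldl bumpSub d).getD k 0 = d.getD k 0 - (xs.count k : Int) := by
  induction xs generalizing d with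
  | nil => simp
  | cons x xs ih =>
    simp only [List.foldl_cons, ih, bumpSub, PySem.Dict.getD_insert, List.count_cons]
    by_cases hx : k = x
    · subst hx; simp; push_cast; ring
    · simp only [if_neg hx, beq_iff_eq, if_neg (fun h => hx (Eq.symm h))]
      push_cast; ring

theorem mem_keys_bumpAdd_fold (xs : List Int) (d : PySem.Dict Int Int) (k : Int) :
    k ∈ (xs.foldl bumpAdd d).keys ↔ k ∈ xs ∨ k ∈ d.keys := by
  induction xs generalizing d with
  | nil => simp
  | cons x xs ih =>
    simp only [List.foldl_cons, ih, bumpAdd, PySem.Dict.mem_keys_insert, List.mem_cons]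
    tauto

theorem mem_keys_bumpSub_fold (xs : List Int) (d : PySem.Dict Int Int) (k : Int) :
    k ∈ (xs.foldl bumpSub d).keys ↔ k ∈ xs ∨ k ∈ d.keys := by
  induction xs generalizing d with
  | nil => simp
  | cons x xs ih =>
    simp only [List.foldl_cons, ih, bumpSub, PySem.Dict.mem_keys_insert, List.mem_cons]
    tauto

theorem nodup_keys_bumpAdd_fold (xs : List Int) (d : PySem.Dict Int Int) (h : d.keys.Nodup) :
    (xs.foldl bumpAdd d).keys.Nodup := by
  induction xs generalizing d with
  | nil => exact h
  | cons x xs ih => exact ih _ (PySem.Dict.nodup_keys_insert _ _ _ h)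

theorem nodup_keys_bumpSub_fold (xs : List Int) (d : PySem.Dict Int Int) (h : d.keys.Nodup) :
    (xs.foldl bumpSub d).keys.Nodup := by
  induction xs generalizing d with
  | nil => exact h
  | cons x xs ih => exact ih _ (PySem.Dict.nodup_keys_insert _ _ _ h)

theorem contains_of_getD_ne (d : PySem.Dict Int Int) (k : Int) (h : d.getD k 0 ≠ 0) :
    d.contains k = true := by
  by_contra hc
  have hnone : d.get? k = none := (PySem.Dict.get?_eq_none_iff_contains d k).2 (by
    cases hb : d.contains k
    · rfl
    · exact absurd hb hc)
  apply h
  simp [PySem.Dict.getD, hnone]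

-- ---- A's first pass ----
theorem foldMatch_count (rs : List Int) (res l : List Int)
    (h : ∀ j, rs.count j ≤ res.count j) (k : Int) :
    (rs.foldl stepMatch (res, l)).1.count k = res.count k - min (l.count k) (rs.count k) ∧
    (rs.foldl stepMatch (res, l)).2.count k = l.count k - min (l.count k) (rs.count k) := by
  induction rs generalizing res l with
  | nil => simp
  | cons i rs ih =>
    simp only [List.foldl_cons]
    by_cases hi : i ∈ l
    · have hires : i ∈ res := by
        have hh := h i
        simp only [List.count_cons, beq_self_eq_true, if_true] at hh
        exact List.count_pos_iff.1 (by omega)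
      have hstep : stepMatch (res, l) i = (res.erase i, l.erase i) := by
        simp [stepMatch, hi, PySem.List.remove?_eq_some_erase res i hires,
          PySem.List.remove?_eq_some_erase l i hi]
      rw [hstep]
      have h' : ∀ j, rs.count j ≤ (res.erase i).count j := by
        intro j
        have hh := h j
        simp only [List.count_cons] at hh
        rw [List.count_erase]
        by_cases hj : i = j
        · subst hj; simp at hh ⊢; omega
        · simp [beq_iff_eq, hj] at hh ⊢; omega
      obtain ⟨h1, h2⟩ := ih (res.erase i) (l.erase i) h'
      have hcl : 0 < l.count i := List.count_pos_iff.2 hi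
      have hcr : 0 < res.count i := List.count_pos_iff.2 hires
      constructor
      · rw [h1]
        by_cases hk : i = k
        · subst hk
          simp [List.count_erase, List.count_cons] <;> omega
        · simp [List.count_erase, List.count_cons, beq_iff_eq, hk] <;> omega
      · rw [h2]
        by_cases hk : i = k
        · subst hk
          simp [List.count_erase, List.count_cons] <;> omega
        · simp [List.count_erase, List.count_cons, beq_iff_eq, hk] <;> omega
    · have hstep : stepMatch (res, l) i = (res, l) := by simp [stepMatch, hi]
      rw [hstep]
      have h' : ∀ j, rs.count j ≤ res.count j := by
        intro j
        have hh := h j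
        simp only [List.count_cons] at hh
        omega
      obtain ⟨h1, h2⟩ := ih res l h'
      have hcli : l.count i = 0 := List.count_eq_zero.2 hi
      constructor
      · rw [h1]
        by_cases hk : i = k
        · subst hk
          simp [List.count_cons] <;> omega
        · simp [List.count_cons, beq_iff_eq, hk] <;> omega
      · rw [h2]
        by_cases hk : i = k
        · subst hk
          simp [List.count_cons] <;> omega
        · simp [List.count_cons, beq_iff_eq, hk] <;> omega

theorem foldMatch_sublist (rs : List Int) (res l : List Int) :
    ((rs.foldl stepMatch (res, l)).1).Sublist res := by
  induction rs generalizing res l with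
  | nil => simp
  | cons i rs ih =>
    simp only [List.foldl_cons]
    have hsub : (stepMatch (res, l) i).1.Sublist res := by
      by_cases hi : i ∈ l
      · simp only [stepMatch, if_pos hi]
        by_cases hmem : i ∈ res
        · rw [PySem.List.remove?_eq_some_erase res i hmem]
          exact List.erase_sublist
        · rw [(PySem.List.remove?_eq_none_iff res i).2 hmem]
          simp
      · simp [stepMatch, hi]
    exact (ih (stepMatch (res, l) i).1 (stepMatch (res, l) i).2).trans hsub

-- ---- grouping of the sorted remaining-reserve list ----
theorem count_flatMap_replicate (K : List Int) (f : Int → Nat) (hK : K.Nodup) (j : Int) :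
    (K.flatMap fun k => List.replicate (f k) k).count j = if j ∈ K then f j else 0 := by
  induction K with
  | nil => simp
  | cons k K ih =>
    simp only [List.flatMap_cons, List.count_append, List.count_replicate, ih hK.of_cons,
      List.mem_cons]
    by_cases hj : j = k
    · subst hj
      have : j ∉ K := (List.nodup_cons.1 hK).1
      simp [this]
    · simp only [beq_iff_eq, if_neg (fun h => hj (Eq.symm h))]
      by_cases hjk : j ∈ K <;> simp [hjk, hj]

theorem pairwise_flatMap_replicate (K : List Int) (f : Int → Nat)
    (hK : K.Pairwise (· < ·)) :
    (K.flatMap fun k => List.replicate (f k) k).Pairwise (· ≤ ·) := by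
  induction K with
  | nil => simp
  | cons k K ih =>
    simp only [List.flatMap_cons]
    rw [List.pairwise_append]
    refine ⟨List.pairwise_replicate.2 (Or.inr le_rfl), ih hK.of_cons, ?_⟩
    intro a ha b hb
    obtain ⟨j, hj, hbj⟩ := List.mem_flatMap.1 hb
    rw [List.eq_of_mem_replicate ha, List.eq_of_mem_replicate hbj]
    exact le_of_lt (List.rel_of_pairwise_cons hK hj)

theorem foldl_flatMap_eq (K : List Int) (g : Int → List Int)
    (f : List Int → Int → List Int) (init : List Int) :
    (K.flatMap g).foldl f init = K.foldl (fun acc k => (g k).foldl f acc) init := by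
  induction K generalizing init with
  | nil => rfl
  | cons k K ih => simp only [List.flatMap_cons, List.foldl_append, List.foldl_cons, ih]

-- ---- A's second pass on one block of equal ids ----
theorem stepLend_replicate_count (m : Nat) (r : Int) (l : List Int) (k : Int) :
    ((List.replicate m r).foldl stepLend l).count k =
      if k = r - 1 then l.count (r - 1) - m
      else if k = r + 1 then l.count (r + 1) - (m - l.count (r - 1))
      else l.count k := by
  induction m generalizing l with
  | zero =>
    simp only [List.replicate_zero, List.foldl_nil]
    split_ifs with h1 h2
    · subst h1; omega
    · subst h2; omega
    · rfl
  | succ m ih =>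
    rw [List.replicate_succ, List.foldl_cons, ih (stepLend l r)]
    have hne : ¬ ((r : Int) - 1 = r + 1) := by omega
    by_cases hm1 : r - 1 ∈ l
    · have hst : stepLend l r = l.erase (r - 1) := by
        simp [stepLend, hm1, PySem.List.remove?_eq_some_erase l _ hm1]
      have hc1 : 0 < l.count (r - 1) := List.count_pos_iff.2 hm1
      have e1 : (l.erase (r - 1)).count (r - 1) = l.count (r - 1) - 1 := by
        simp [List.count_erase]
      have e2 : (l.erase (r - 1)).count (r + 1) = l.count (r + 1) := by
        rw [List.count_erase]; simp [hne]
      rw [hst]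
      split_ifs with h1 h2
      · subst h1; rw [e1]; omega
      · subst h2; rw [e1, e2]; omega
      · rw [List.count_erase]
        have h1' : ¬ (r - 1 = k) := fun h => h1 (Eq.symm h)
        simp [h1']
    · by_cases hm2 : r + 1 ∈ l
      · have hst : stepLend l r = l.erase (r + 1) := by
          simp [stepLend, hm1, hm2, PySem.List.remove?_eq_some_erase l _ hm2]
        have hc1 : l.count (r - 1) = 0 := List.count_eq_zero.2 hm1
        have hc2 : 0 < l.count (r + 1) := List.count_pos_iff.2 hm2
        have e1 : (l.erase (r + 1)).count (r - 1) = l.count (r - 1) := by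
          rw [List.count_erase]
          have hne' : ¬ (r + 1 = r - 1) := fun h => hne (Eq.symm h)
          simp [hne']
        have e2 : (l.erase (r + 1)).count (r + 1) = l.count (r + 1) - 1 := by
          simp [List.count_erase]
        rw [hst]
        split_ifs with h1 h2
        · subst h1; rw [e1]; omega
        · subst h2; rw [e1, e2]; omega
        · rw [List.count_erase]
          have h2' : ¬ (r + 1 = k) := fun h => h2 (Eq.symm h)
          simp [h2']
      · have hst : stepLend l r = l := by simp [stepLend, hm1, hm2]
        have hc1 : l.count (r - 1) = 0 := List.count_eq_zero.2 hm1
        have hc2 : l.count (r + 1) = 0 := List.count_eq_zero.2 hm2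
        rw [hst]
        split_ifs with h1 h2
        · subst h1; omega
        · subst h2; omega
        · rfl

-- ---- lockstep: one key of the sweep ----
theorem keys_insert_getD_pos (d : PySem.Dict Int Int) (k v : Int) (h : d.getD k 0 ≠ 0) :
    (d.insert k v).keys = d.keys :=
  PySem.Dict.keys_insert_of_contains d v (contains_of_getD_ne d k h)

theorem sweepKey_keys (d : PySem.Dict Int Int) (r : Int) : (sweepKey d r).keys = d.keys := by
  simp only [sweepKey]
  split_ifs with h0 hg hg2 hg2'
  · rw [keys_insert_getD_pos _ _ _ (by have := lt_of_lt_of_le hg2 (min_le_right _ _); omega)]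
    exact keys_insert_getD_pos _ _ _ (by have := lt_of_lt_of_le hg (min_le_right _ _); omega)
  · exact keys_insert_getD_pos _ _ _ (by have := lt_of_lt_of_le hg (min_le_right _ _); omega)
  · exact keys_insert_getD_pos _ _ _ (by have := lt_of_lt_of_le hg2' (min_le_right _ _); omega)
  · rfl
  · rfl

theorem sweepKey_getD (d : PySem.Dict Int Int) (r : Int) (h0 : 0 < -(d.getD r 0)) (k : Int) :
    (sweepKey d r).getD k 0 =
      if k = r - 1 then d.getD (r - 1) 0 - min (-(d.getD r 0)) (max (d.getD (r - 1) 0) 0)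
      else if k = r + 1 then d.getD (r + 1) 0 -
        min (-(d.getD r 0) - min (-(d.getD r 0)) (max (d.getD (r - 1) 0) 0))
            (max (d.getD (r + 1) 0) 0)
      else d.getD k 0 := by
  have hne : (r : Int) - 1 ≠ r + 1 := by omega
  have hne' : (r : Int) + 1 ≠ r - 1 := by omega
  simp only [sweepKey, if_pos h0]
  by_cases hg : 0 < min (-(d.getD r 0)) (max (d.getD (r - 1) 0) 0)
  · simp only [if_pos hg, PySem.Dict.getD_insert, if_neg hne']
    by_cases hg2 : 0 < min (-(d.getD r 0) - min (-(d.getD r 0)) (max (d.getD (r - 1) 0) 0))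
        (max (d.getD (r + 1) 0) 0)
    · simp only [if_pos hg2, PySem.Dict.getD_insert]
      split_ifs <;> simp_all <;> omega
    · simp only [if_neg hg2, PySem.Dict.getD_insert]
      split_ifs <;> simp_all <;> omega
  · simp only [if_neg hg]
    by_cases hg2 : 0 < min (-(d.getD r 0) - min (-(d.getD r 0)) (max (d.getD (r - 1) 0) 0))
        (max (d.getD (r + 1) 0) 0)
    · simp only [if_pos hg2, PySem.Dict.getD_insert]
      split_ifs <;> simp_all <;> omega
    · simp only [if_neg hg2]
      split_ifs <;> simp_all <;> omega

theorem sweepKey_inv (N : PySem.Dict Int Int) (lost reserve : List Int)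
    (hN : ∀ k, N.getD k 0 = (lost.count k : Int) - (reserve.count k : Int))
    (l : List Int) (d : PySem.Dict Int Int) (hI : InvD N l d) (r : Int) :
    InvD N ((List.replicate (mA lost reserve r) r).foldl stepLend l) (sweepKey d r) := by
  have unfI : ∀ j, (N.getD j 0 < 0 ∧ d.getD j 0 = N.getD j 0 ∧ l.count j = 0) ∨
      (0 ≤ N.getD j 0 ∧ d.getD j 0 = (l.count j : Int)) := by
    intro j
    have hj' := hI j
    unfold InvD at hj'
    by_cases hj : N.getD j 0 < 0
    · rw [if_pos hj] at hj'
      exact Or.inl ⟨hj, hj'⟩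
    · rw [if_neg hj] at hj'
      exact Or.inr ⟨by omega, hj'⟩
  by_cases hr : N.getD r 0 < 0
  case neg =>
    have hdr : d.getD r 0 = (l.count r : Int) := by
      rcases unfI r with ⟨h1, _, _⟩ | ⟨_, h2⟩
      · exact absurd h1 hr
      · exact h2
    have hm0 : mA lost reserve r = 0 := by
      have := hN r
      unfold mA
      omega
    have hsweep : sweepKey d r = d := by
      simp only [sweepKey]
      rw [if_neg (by rw [hdr]; omega)]
    rw [hm0, hsweep]
    simpa using hI
  case pos =>
    obtain ⟨hdr, hcr⟩ : d.getD r 0 = N.getD r 0 ∧ l.count r = 0 := by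
      rcases unfI r with ⟨_, h2⟩ | ⟨h1, _⟩
      · exact h2
      · omega
    have hNr := hN r
    have hM : (mA lost reserve r : Int) = -(d.getD r 0) := by
      unfold mA
      omega
    have hmne : 0 < -(d.getD r 0) := by
      rw [hdr]
      omega
    have hne1 : (r : Int) - 1 ≠ r + 1 := by omega
    intro k
    have hcnt := stepLend_replicate_count (mA lost reserve r) r l k
    have hgd := sweepKey_getD d r hmne k
    have hu1 := unfI (r - 1)
    have hu2 := unfI (r + 1)
    have huk := unfI k
    by_cases hNk : N.getD k 0 < 0
    · rw [if_pos hNk]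
      by_cases hk1 : k = r - 1
      · subst hk1
        rcases hu1 with ⟨_, hd1, hc1⟩ | ⟨hge, _⟩
        · constructor
          · rw [hgd, if_pos rfl, hd1]
            omega
          · rw [hcnt, if_pos rfl, hc1]
            omega
        · omega
      · by_cases hk2 : k = r + 1
        · subst hk2
          rcases hu2 with ⟨_, hd2, hc2⟩ | ⟨hge, _⟩
          · constructor
            · rw [hgd, if_neg (Ne.symm hne1), if_pos rfl, hd2]
              omega
            · rw [hcnt, if_neg (by omega), if_pos rfl, hc2]
              omega
          · omega
        · rcases huk with ⟨_, hdk, hck⟩ | ⟨hge, _⟩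
          · constructor
            · rw [hgd, if_neg hk1, if_neg hk2]
              exact hdk
            · rw [hcnt, if_neg hk1, if_neg hk2]
              exact hck
          · omega
    · rw [if_neg hNk]
      by_cases hk1 : k = r - 1
      · subst hk1
        rw [hgd, if_pos rfl, hcnt, if_pos rfl]
        rcases hu1 with ⟨hlt, _, _⟩ | ⟨_, hd1⟩
        · omega
        · rw [hd1]
          omega
      · by_cases hk2 : k = r + 1
        · subst hk2
          rw [hgd, if_neg (Ne.symm hne1), if_pos rfl, hcnt, if_neg (by omega), if_pos rfl]
          rcases hu2 with ⟨hlt, _, _⟩ | ⟨_, hd2⟩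
          · omega
          · rw [hd2]
            rcases hu1 with ⟨hlt1, hd1, hc1⟩ | ⟨hge1, hd1⟩ <;> omega
        · rw [hgd, if_neg hk1, if_neg hk2, hcnt, if_neg hk1, if_neg hk2]
          rcases huk with ⟨hlt, _, _⟩ | ⟨_, hdk⟩
          · omega
          · exact hdk

theorem sweep_fold_inv (N : PySem.Dict Int Int) (lost reserve : List Int)
    (hN : ∀ k, N.getD k 0 = (lost.count k : Int) - (reserve.count k : Int))
    (K : List Int) (l : List Int) (d : PySem.Dict Int Int) (hI : InvD N l d) :
    InvD N (K.foldl (fun acc k => (List.replicate (mA lost reserve k) k).foldl stepLend acc) l)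
          (K.foldl sweepKey d) := by
  induction K generalizing l d with
  | nil => exact hI
  | cons r K ih =>
    simp only [List.foldl_cons]
    exact ih _ _ (sweepKey_inv N lost reserve hN l d hI r)

theorem sweep_fold_keys (K : List Int) (d : PySem.Dict Int Int) :
    (K.foldl sweepKey d).keys = d.keys := by
  induction K generalizing d with
  | nil => rfl
  | cons r K ih => rw [List.foldl_cons, ih, sweepKey_keys]

-- ---- final summation ----
theorem values_eq_map_getD (d : PySem.Dict Int Int) (h : d.keys.Nodup) :
    d.values = d.keys.map (fun k => d.getD k 0) := by
  obtain ⟨ps⟩ := d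
  simp only [PySem.Dict.values, PySem.Dict.keys, PySem.Dict.getD, PySem.Dict.get?] at h ⊢
  induction ps with
  | nil => rfl
  | cons p ps ih =>
    simp only [List.map_cons, List.find?_cons, beq_self_eq_true] at h ⊢
    refine List.cons_eq_cons.mpr ⟨?_, ?_⟩
    · simp
    · rw [ih (List.nodup_cons.1 h).2]
      refine List.map_congr_left ?_
      intro k hk
      have hpk : ¬ (p.1 == k) = true := by
        simp only [beq_iff_eq]
        intro he
        exact (List.nodup_cons.1 h).1 (he ▸ hk)
      simp [hpk]

theorem filter_pos_sum (vs : List Int) :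
    (vs.filter (fun v => decide (0 < v))).sum = (vs.map (fun v => max v 0)).sum := by
  induction vs with
  | nil => rfl
  | cons v vs ih =>
    by_cases hv : 0 < v
    · simp [List.filter_cons, hv, ih]; omega
    · simp [List.filter_cons, hv, ih]; omega

theorem length_count_filter (k : Int) (t : List Int) :
    t.length = t.count k + (t.filter (fun x => decide (x ≠ k))).length := by
  induction t with
  | nil => rfl
  | cons x xs ihx =>
    by_cases hx : x = k
    · subst hx
      simp [List.count_cons, List.filter_cons, ihx] <;> omega
    · simp [List.count_cons, List.filter_cons, hx, beq_iff_eq, ihx] <;> omega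

theorem len_eq_sum_counts (K : List Int) (l : List Int) (hK : K.Nodup)
    (hcov : ∀ x ∈ l, x ∈ K) : (K.map (fun k => l.count k)).sum = l.length := by
  induction K generalizing l with
  | nil =>
    have : l = [] := by
      cases l with
      | nil => rfl
      | cons x xs => exact absurd (hcov x (by simp)) (by simp)
    simp [this]
  | cons k K ih =>
    have hk : k ∉ K := (List.nodup_cons.1 hK).1
    set l' := l.filter (fun x => decide (x ≠ k)) with hl'
    have hcount : ∀ j, j ≠ k → l'.count j = l.count j := by
      intro j hj
      exact List.count_filter (by simp [hj])
    have hlen : l.length = l.count k + l'.length := by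
      rw [hl']; exact length_count_filter k l
    have hmap : K.map (fun j => l.count j) = K.map (fun j => l'.count j) :=
      List.map_congr_left (fun j hj => (hcount j (fun h => hk (h ▸ hj))).symm)
    have hcov' : ∀ x ∈ l', x ∈ K := by
      intro x hx
      obtain ⟨hxl, hxk⟩ := List.mem_filter.1 hx
      have := hcov x hxl
      simp only [List.mem_cons] at this
      rcases this with h | h
      · exact absurd h (by simpa using hxk)
      · exact h
    simp only [List.map_cons, List.sum_cons, hmap, ih l' hK.of_cons hcov']
    omega

-- ===== VERDICT (by name: the statement is the Claim_ definition above) =====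
theorem getD_zero_of_not_mem_keys (d : PySem.Dict Int Int) (k : Int) (h : k ∉ d.keys) :
    d.getD k 0 = 0 := by
  have hc : d.contains k = false := by
    cases hb : d.contains k
    · rfl
    · exact absurd ((PySem.Dict.contains_iff_mem_keys d k).1 hb) h
  have hnone := (PySem.Dict.get?_eq_none_iff_contains d k).2 hc
  simp [PySem.Dict.getD, hnone]

theorem solution_spec : Claim_equal_solution := by
  intro n lost reserve _
  show solution n lost reserve = solution_alt n lost reserve
  simp only [solution, solution_alt]
  set L1 := PySem.List.sorted lost (fun x => x) false with hL1
  set R1 := PySem.List.sorted reserve (fun x => x) false with hR1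
  set net0 := List.foldl bumpAdd PySem.Dict.empty lost with hnet0
  set net1 := List.foldl bumpSub net0 reserve with hnet1
  have hN : ∀ k, net1.getD k 0 = (lost.count k : Int) - (reserve.count k : Int) := by
    intro k
    rw [hnet1, getD_bumpSub_fold, hnet0, getD_bumpAdd_fold, PySem.Dict.getD_empty]
    ring
  have hkeysnodup : net1.keys.Nodup :=
    nodup_keys_bumpSub_fold _ _ (nodup_keys_bumpAdd_fold _ _ PySem.Dict.nodup_keys_empty)
  have hmemkeys : ∀ k, k ∈ net1.keys ↔ k ∈ lost ∨ k ∈ reserve := by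
    intro k
    rw [hnet1, mem_keys_bumpSub_fold, hnet0, mem_keys_bumpAdd_fold, PySem.Dict.keys_empty]
    simp
    tauto
  set K := PySem.List.sorted net1.keys (fun x => x) false with hK
  have hKperm : K.Perm net1.keys := PySem.List.sorted_perm _ _ _
  have hKnodup : K.Nodup := (List.Perm.nodup_iff hKperm).2 hkeysnodup
  have hKle : K.Pairwise (· ≤ ·) := by
    simpa using PySem.List.sorted_pairwise net1.keys (fun x => x)
  have hKlt : K.Pairwise (· < ·) :=
    (hKle.and hKnodup).imp (fun h => lt_of_le_of_ne h.1 h.2)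
  have hKmem : ∀ k, k ∈ K ↔ k ∈ lost ∨ k ∈ reserve := by
    intro k
    rw [hKperm.mem_iff, hmemkeys]
  have hcL1 : ∀ k, L1.count k = lost.count k :=
    fun k => (PySem.List.sorted_perm lost (fun x => x) false).count_eq k
  have hcR1 : ∀ k, R1.count k = reserve.count k :=
    fun k => (PySem.List.sorted_perm reserve (fun x => x) false).count_eq k
  set st := List.foldl stepMatch (R1, L1) R1 with hst
  have hstc := fun (k : Int) => foldMatch_count R1 R1 L1 (fun j => le_rfl) k
  have hres : ∀ k, st.1.count k = reserve.count k - min (lost.count k) (reserve.count k) := by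
    intro k
    rw [hst, (hstc k).1, hcR1, hcL1]
  have hlost2 : ∀ k, st.2.count k = lost.count k - min (lost.count k) (reserve.count k) := by
    intro k
    rw [hst, (hstc k).2, hcR1, hcL1]
  set E := K.flatMap (fun k => List.replicate (mA lost reserve k) k) with hE
  have hEcount : ∀ j, E.count j = mA lost reserve j := by
    intro j
    rw [hE, count_flatMap_replicate K _ hKnodup]
    by_cases hj : j ∈ K
    · simp [hj]
    · have hjr : j ∉ reserve := fun hh => hj ((hKmem j).2 (Or.inr hh))
      have hcz : reserve.count j = 0 := List.count_eq_zero.2 hjr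
      simp [hj, mA, hcz]
  have hstE : st.1 = E := by
    apply PySem.List.eq_of_perm_of_pairwise_le_of_injective (fun x => x) (fun a b h => h)
    · refine List.perm_iff_count.2 (fun a => ?_)
      rw [hres a, hEcount a, mA]
    · have hR1le : R1.Pairwise (· ≤ ·) := by
        simpa using PySem.List.sorted_pairwise reserve (fun x => x)
      exact List.Pairwise.sublist (hst ▸ foldMatch_sublist R1 R1 L1) hR1le
    · exact pairwise_flatMap_replicate K _ hKlt
  have hInv0 : InvD net1 st.2 net1 := by
    intro k
    by_cases hk : net1.getD k 0 < 0
    · rw [if_pos hk]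
      refine ⟨rfl, ?_⟩
      rw [hlost2 k]
      have := hN k
      omega
    · rw [if_neg hk]
      rw [hlost2 k]
      have := hN k
      omega
  set lost3 := List.foldl stepLend st.2 st.1 with hlost3
  set net2 := List.foldl sweepKey net1 K with hnet2
  have hA2 : lost3 = K.foldl (fun acc k => (List.replicate (mA lost reserve k) k).foldl stepLend acc) st.2 := by
    rw [hlost3, hstE, hE, foldl_flatMap_eq]
  have hInvF : InvD net1 lost3 net2 := by
    rw [hA2, hnet2]
    exact sweep_fold_inv net1 lost reserve hN K st.2 net1 hInv0
  have hkeys2 : net2.keys = net1.keys := sweep_fold_keys K net1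
  have hval : net2.values = net2.keys.map (fun k => net2.getD k 0) :=
    values_eq_map_getD net2 (by rw [hkeys2]; exact hkeysnodup)
  have hsum : (net2.values.filter (fun v => decide (0 < v))).sum
      = (net1.keys.map (fun k => (lost3.count k : Int))).sum := by
    rw [filter_pos_sum, hval, hkeys2, List.map_map]
    refine congrArg List.sum (List.map_congr_left ?_)
    intro k hk
    have hIk := hInvF k
    simp only [Function.comp]
    by_cases hc : net1.getD k 0 < 0
    · rw [if_pos hc] at hIk
      obtain ⟨h1, h2⟩ := hIk
      rw [h1, h2]
      omega
    · rw [if_neg hc] at hIk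
      rw [hIk]
      omega
  have hcov : ∀ x ∈ lost3, x ∈ net1.keys := by
    intro x hx
    by_contra hmem
    have hIk := hInvF x
    have hg1 : net1.getD x 0 = 0 := getD_zero_of_not_mem_keys net1 x hmem
    have hg2 : net2.getD x 0 = 0 :=
      getD_zero_of_not_mem_keys net2 x (by rw [hkeys2]; exact hmem)
    rw [if_neg (by omega)] at hIk
    have hpos : 0 < lost3.count x := List.count_pos_iff.2 hx
    omega
  have hlen : (net1.keys.map (fun k => lost3.count k)).sum = lost3.length :=
    len_eq_sum_counts _ _ hkeysnodup hcov
  have hcast : (net1.keys.map (fun k => (lost3.count k : Int))).sum = (lost3.length : Int) := by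
    rw [← hlen, Nat.cast_list_sum, List.map_map]
    rfl
  rw [hsum, hcast]
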